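-- pv_equiv track=rewrite | github.com/Deepaksujay/Design-and-anlysis-of-Algorithms | greedy_jobs.py | greedy_min_penalty
-- ===== SOURCE A (Python) =====
-- def greedy_min_penalty(jobs,slots): #jobs = job-deadline-loss
--     jobs_sorted = sorted(jobs,key=lambda x: -x[2])
--     slot = []
--     penalty = 0
--     loss = 0
--     for job in jobs_sorted:
--         penalty = penalty + job[2]
--     for i in range(0,slots):
--         slot.append(0)
--     for job in jobs_sorted:
--         deadline = job[1]
--         for i in range(deadline-1,-1,-1):
--             if slot[i] == 0:
--                 slot[i] = job[0]
--                 loss = loss + job[2]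
--                 break
--     penalty = penalty - loss
--     return slot,penalty
-- ===== SOURCE B (Python) =====
-- def _latest_free(slot, nxt, i):
--     """Largest j <= i with slot[j] == 0 (or -1 if none), compressing nxt on the way.
--     nxt[k] <= k always points at-or-below k with every slot in (nxt[k], k] occupied."""
--     path = []
--     while i >= 0 and slot[nxt[i]] != 0:
--         path.append(i)
--         i = nxt[i] - 1
--     free = nxt[i] if i >= 0 else -1
--     for k in path:
--         # everything in (free, k] is occupied; point k straight at the answer
--         nxt[k] = free if free >= 0 else 0
--     return free
--
--
-- def greedy_min_penalty(jobs, slots):  # jobs = job-deadline-loss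
--     jobs_sorted = sorted(jobs, key=lambda x: -x[2])
--     penalty = sum(job[2] for job in jobs_sorted)
--     slot = [0] * slots
--     nxt = list(range(len(slot)))
--     loss = 0
--     for job_id, deadline, job_loss in jobs_sorted:
--         i = _latest_free(slot, nxt, deadline - 1)
--         if i >= 0:
--             slot[i] = job_id
--             loss += job_loss
--     return slot, penalty - loss
-- ===== Notes on version B (the rewrite author's own statement) =====
-- stated objective: alternative
-- what changed: Instead of rescanning the slot array downward from deadline-1 for every job, B keeps a path-compressed jump-pointer array (union-find over slots) so each search for the latest free slot skips runs of occupied slots; Pre_ excludes only the inputs where A raises IndexError (a job with deadline greater than the number of slots).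
import Mathlib
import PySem

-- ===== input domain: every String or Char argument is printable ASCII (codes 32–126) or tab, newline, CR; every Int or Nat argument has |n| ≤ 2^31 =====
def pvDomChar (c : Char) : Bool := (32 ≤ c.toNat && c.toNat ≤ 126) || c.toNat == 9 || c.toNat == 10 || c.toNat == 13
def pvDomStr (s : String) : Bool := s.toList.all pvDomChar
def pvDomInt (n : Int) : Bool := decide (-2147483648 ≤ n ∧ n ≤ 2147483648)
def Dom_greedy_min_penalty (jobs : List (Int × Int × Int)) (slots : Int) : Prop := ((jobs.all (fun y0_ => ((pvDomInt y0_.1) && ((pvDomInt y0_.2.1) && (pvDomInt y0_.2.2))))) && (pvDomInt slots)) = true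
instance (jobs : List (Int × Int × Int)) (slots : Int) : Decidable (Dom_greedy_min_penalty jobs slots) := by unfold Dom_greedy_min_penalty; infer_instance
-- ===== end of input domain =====

-- B replaces A's fresh downward scan of the slot array per job by path-compressed jump
-- pointers over the slots that locate the latest free slot (union-find style); same value,
-- different search structure.
-- (Neither version mutates anything a caller observes; the argument list is untouched.)

-- ===== PORT A =====
-- inner loop 'for i in range(deadline-1,-1,-1): if slot[i]==0: slot[i]=job[0]; loss+=job[2]; break';
-- slot[i] is read with pyGetD default 1 (≠ 0): the out-of-range reads, on which Python raises
-- IndexError, are excluded by Pre_, so the default is never the value compared on admitted inputs.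
def pvInnerA (jid l : Int) : List Int → List Int → Int → List Int × Int
  | [], slot, loss => (slot, loss)
  | i :: is, slot, loss =>
    if PySem.List.pyGetD slot i 1 = 0 then (PySem.List.pySetD slot i jid, loss + l)
    else pvInnerA jid l is slot loss

-- 'for job in jobs_sorted: …' (the scheduling loop)
def pvOuterA : List (Int × Int × Int) → List Int → Int → List Int × Int
  | [], slot, loss => (slot, loss)
  | j :: rest, slot, loss =>
    let p := pvInnerA j.1 j.2.2 (PySem.List.pyRange (j.2.1 - 1) (-1) (-1)) slot loss
    pvOuterA rest p.1 p.2

def greedy_min_penalty (jobs : List (Int × Int × Int)) (slots : Int) : List Int × Int :=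
  let jobs_sorted := PySem.List.sorted jobs (fun x => -x.2.2) false
  let penalty := jobs_sorted.foldl (fun p j => p + j.2.2) 0
  let slot := (PySem.List.pyRange 0 slots 1).foldl (fun s _ => s ++ [(0 : Int)]) []
  let r := pvOuterA jobs_sorted slot 0
  (r.1, penalty - r.2)

-- ===== PORT B =====
-- the 'while i >= 0 and slot[nxt[i]] != 0: path.append(i); i = nxt[i] - 1' walk of _latest_free;
-- the fuel (slot.length + 2 at the call site) is only a totality guard: under the jump-pointer
-- invariant the walk strictly descends, so the guard branch is never reached from
-- greedy_min_penalty_alt; the pyGetD defaults stand for the in-range reads Python performs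
def pvWalkB (slot nxt : List Int) : Nat → Int → List Int → List Int × Int
  | 0, _, path => (path, -1)
  | fuel + 1, i, path =>
    if i < 0 then (path, -1)
    else if PySem.List.pyGetD slot (PySem.List.pyGetD nxt i 0) 1 ≠ 0 then
      pvWalkB slot nxt fuel (PySem.List.pyGetD nxt i 0 - 1) (path ++ [i])
    else (path, PySem.List.pyGetD nxt i 0)

-- '_latest_free': the walk (with 'free = nxt[i] if i >= 0 else -1' folded into its result),
-- then the compression loop 'for k in path: nxt[k] = free if free >= 0 else 0';
-- returns (free, updated nxt)
def pvLatestFree (slot nxt : List Int) (i : Int) : Int × List Int :=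
  let r := pvWalkB slot nxt (slot.length + 2) i []
  (r.2, r.1.foldl (fun nx k => PySem.List.pySetD nx k (if 0 ≤ r.2 then r.2 else 0)) nxt)

-- 'for job_id, deadline, job_loss in jobs_sorted: …'
def pvOuterB : List (Int × Int × Int) → List Int → List Int → Int → List Int × List Int × Int
  | [], slot, nxt, loss => (slot, nxt, loss)
  | j :: rest, slot, nxt, loss =>
    let r := pvLatestFree slot nxt (j.2.1 - 1)
    if 0 ≤ r.1 then pvOuterB rest (PySem.List.pySetD slot r.1 j.1) r.2 (loss + j.2.2)
    else pvOuterB rest slot r.2 loss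

def greedy_min_penalty_alt (jobs : List (Int × Int × Int)) (slots : Int) : List Int × Int :=
  let jobs_sorted := PySem.List.sorted jobs (fun x => -x.2.2) false
  let penalty := (jobs_sorted.map (fun j => j.2.2)).sum
  let slot := List.replicate slots.toNat (0 : Int)   -- '[0] * slots' ([] when slots ≤ 0)
  let nxt := PySem.List.pyRange 0 (slot.length : Int) 1
  let r := pvOuterB jobs_sorted slot nxt 0
  (r.1, penalty - r.2.2)

-- ===== PRECONDITION & SPEC =====
-- Pre_ excludes exactly the inputs on which A raises IndexError: a job whose deadline is ≥ 1
-- but exceeds the number of slots makes A read slot[deadline-1] out of range.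
def Pre_greedy_min_penalty (jobs : List (Int × Int × Int)) (slots : Int) : Prop :=
  ∀ j ∈ jobs, j.2.1 ≤ slots ∨ j.2.1 ≤ 0
instance (jobs : List (Int × Int × Int)) (slots : Int) : Decidable (Pre_greedy_min_penalty jobs slots) := by unfold Pre_greedy_min_penalty; infer_instance

def pvWitness_greedy_min_penalty : (List (Int × Int × Int)) × Int := ([(1, 1, 4), (2, 1, 3), (3, 2, 9)], 2)

def Spec_greedy_min_penalty (jobs : List (Int × Int × Int)) (slots : Int) (out : List Int × Int) : Prop := out = greedy_min_penalty_alt jobs slots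
instance (jobs : List (Int × Int × Int)) (slots : Int) (out : List Int × Int) : Decidable (Spec_greedy_min_penalty jobs slots out) := by unfold Spec_greedy_min_penalty; infer_instance

-- ===== CLAIM (what is proved, stated in full; the proofs are below) =====
def Claim_equal_greedy_min_penalty : Prop := ∀ (jobs : List (Int × Int × Int)) (slots : Int), Dom_greedy_min_penalty jobs slots → Pre_greedy_min_penalty jobs slots → Spec_greedy_min_penalty jobs slots (greedy_min_penalty jobs slots)

-- ===== LEMMAS AND PROOFS =====

-- the largest still-free index below m (A's inner scan lands exactly there)
def pvTop (slot : List Int) : Nat → Option Nat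
  | 0 => none
  | m + 1 => if slot.getD m 1 = 0 then some m else pvTop slot m

-- the Int-valued answer B's walk produces for a query at index i
def pvF (slot : List Int) (i : Int) : Int :=
  if i < 0 then -1 else
    match pvTop slot (i.toNat + 1) with
    | some k => (k : Int)
    | none => -1

-- the jump-pointer invariant: nxt[k] sits at or below k and every slot strictly between is occupied
def pvInvB (slot nxt : List Int) : Prop :=
  nxt.length = slot.length ∧
  ∀ k : Nat, k < slot.length →
    0 ≤ nxt.getD k 0 ∧ nxt.getD k 0 ≤ (k : Int) ∧
    ∀ m : Nat, nxt.getD k 0 < (m : Int) → (m : Int) ≤ (k : Int) → ¬ slot.getD m 1 = 0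

lemma pv_getD_set_ne (l : List Int) (k j : Nat) (v d : Int) (h : j ≠ k) :
    (l.set k v).getD j d = l.getD j d := by
  simp [List.getD_eq_getElem?_getD, List.getElem?_set_ne (fun hh => h hh.symm)]

lemma pv_getD_set_self (l : List Int) (k : Nat) (v : Int) (h : k < l.length) (d : Int) :
    (l.set k v).getD k d = v := by
  simp [List.getD_eq_getElem?_getD, h]

lemma pvTop_some (slot : List Int) (dn k : Nat) (h : pvTop slot dn = some k) :
    k < dn ∧ slot.getD k 1 = 0 ∧ k < slot.length := by
  induction dn with
  | zero => simp [pvTop] at h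
  | succ m ih =>
    unfold pvTop at h
    split_ifs at h with hz
    · cases h
      refine ⟨Nat.lt_succ_self _, hz, ?_⟩
      by_contra hlen
      rw [List.getD_eq_default _ _ (by omega)] at hz
      exact one_ne_zero hz
    · obtain ⟨h1, h2, h3⟩ := ih h
      exact ⟨by omega, h2, h3⟩

lemma pvTop_max (slot : List Int) (dn k : Nat) (h : pvTop slot dn = some k) :
    ∀ j, k < j → j < dn → ¬ slot.getD j 1 = 0 := by
  induction dn with
  | zero => intro j _ hj; omega
  | succ m ih =>
    intro j hkj hjm
    unfold pvTop at h
    split_ifs at h with hz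
    · cases h; omega
    · rcases Nat.lt_succ_iff_lt_or_eq.mp hjm with hlt | rfl
      · exact ih h j hkj hlt
      · exact hz

lemma pvTop_none (slot : List Int) (dn : Nat) (h : pvTop slot dn = none) :
    ∀ j, j < dn → ¬ slot.getD j 1 = 0 := by
  induction dn with
  | zero => intro j hj; omega
  | succ m ih =>
    intro j hjm
    simp only [pvTop] at h
    split_ifs at h with hz
    rcases Nat.lt_succ_iff_lt_or_eq.mp hjm with hlt | rfl
    · exact ih h j hlt
    · exact hz

lemma pvTop_intro (slot : List Int) (dn k : Nat) (hk : k < dn) (hz : slot.getD k 1 = 0)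
    (hocc : ∀ j, k < j → j < dn → ¬ slot.getD j 1 = 0) : pvTop slot dn = some k := by
  induction dn with
  | zero => omega
  | succ m ih =>
    simp only [pvTop]
    by_cases hm : k = m
    · subst hm; rw [if_pos hz]
    · rw [if_neg (hocc m (by omega) (by omega))]
      exact ih (by omega) (fun j h1 h2 => hocc j h1 (by omega))

lemma pvTop_succ_occ (slot : List Int) (m : Nat) (h : ¬ slot.getD m 1 = 0) :
    pvTop slot (m + 1) = pvTop slot m := by
  simp only [pvTop]
  rw [if_neg h]

lemma pvTop_congr (slot : List Int) (a b : Nat) (hab : a ≤ b)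
    (hocc : ∀ m, a ≤ m → m < b → ¬ slot.getD m 1 = 0) : pvTop slot b = pvTop slot a := by
  induction b with
  | zero =>
    have : a = 0 := by omega
    rw [this]
  | succ m ih =>
    by_cases hm : a = m + 1
    · rw [hm]
    · have ha : a ≤ m := by omega
      rw [pvTop_succ_occ slot m (hocc m ha (by omega))]
      exact ih ha (fun j h1 h2 => hocc j h1 (by omega))

-- the port of A's inner downward scan computes pvTop
lemma pvInnerA_eq (jid l loss : Int) (slot : List Int) (dn : Nat) :
    pvInnerA jid l (PySem.List.pyRange ((dn : Int) - 1) (-1) (-1)) slot loss =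
      match pvTop slot dn with
      | some k => (slot.set k jid, loss + l)
      | none => (slot, loss) := by
  induction dn with
  | zero =>
    rw [PySem.List.pyRange_neg_one_eq_nil (by omega)]
    simp [pvInnerA, pvTop]
  | succ m ih =>
    have hc : ((m + 1 : Nat) : Int) - 1 = (m : Int) := by push_cast; ring
    rw [hc, PySem.List.pyRange_neg_one_cons (by omega)]
    unfold pvInnerA
    have hg : PySem.List.pyGetD slot (m : Int) 1 = slot.getD m 1 := by
      simp [PySem.List.pyGetD_natCast, List.getD_eq_getElem?_getD]
    rw [hg]
    unfold pvTop
    split_ifs with hz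
    · rw [PySem.List.pySetD_natCast]
    · exact ih

lemma pvF_of_neg (slot : List Int) (i : Int) (h : i < 0) : pvF slot i = -1 := by
  simp [pvF, h]

lemma pvF_of_top (slot : List Int) (i : Int) (k : Nat) (h : ¬ i < 0)
    (hT : pvTop slot (i.toNat + 1) = some k) : pvF slot i = (k : Int) := by
  simp [pvF, h, hT]

lemma pvF_of_none (slot : List Int) (i : Int) (h : ¬ i < 0)
    (hT : pvTop slot (i.toNat + 1) = none) : pvF slot i = -1 := by
  simp [pvF, h, hT]

lemma pvF_le (slot : List Int) (i : Int) : pvF slot i ≤ i ∨ pvF slot i = -1 := by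
  by_cases hi : i < 0
  · right; exact pvF_of_neg slot i hi
  · cases hT : pvTop slot (i.toNat + 1) with
    | none => right; exact pvF_of_none slot i hi hT
    | some k =>
      left
      rw [pvF_of_top slot i k hi hT]
      have := (pvTop_some slot _ k hT).1
      omega

lemma pvF_max (slot : List Int) (i : Int) :
    ∀ m : Nat, pvF slot i < (m : Int) → (m : Int) ≤ i → ¬ slot.getD m 1 = 0 := by
  intro m h1 h2
  by_cases hi : i < 0
  · omega
  · cases hT : pvTop slot (i.toNat + 1) with
    | none => exact pvTop_none slot _ hT m (by omega)
    | some k =>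
      rw [pvF_of_top slot i k hi hT] at h1
      exact pvTop_max slot _ k hT m (by omega) (by omega)

-- B's walk, run with enough fuel on an invariant-respecting state, returns exactly pvF
-- together with a path of indices strictly above the answer
lemma pvWalk_spec (slot nxt : List Int) (hInv : pvInvB slot nxt) :
    ∀ (fuel : Nat) (i : Int) (path : List Int), i < (slot.length : Int) →
    (if i < 0 then 1 else i.toNat + 2) ≤ fuel →
    ∃ p, pvWalkB slot nxt fuel i path = (path ++ p, pvF slot i) ∧
      ∀ k ∈ p, 0 ≤ k ∧ k < (slot.length : Int) ∧ pvF slot i < k ∧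
        ∀ m : Nat, pvF slot i < (m : Int) → (m : Int) ≤ k → ¬ slot.getD m 1 = 0 := by
  obtain ⟨hlen, hI⟩ := hInv
  intro fuel
  induction fuel with
  | zero =>
    intro i path _ h2
    split_ifs at h2 <;> omega
  | succ f ihf =>
    intro i path hilen hfuel
    by_cases hi : i < 0
    · refine ⟨[], ?_, by simp⟩
      unfold pvWalkB
      rw [if_pos hi, pvF_of_neg slot i hi]
      simp
    · rw [if_neg hi] at hfuel
      have hi' : 0 ≤ i := by omega
      have hik : i.toNat < slot.length := by omega
      have hnxt : PySem.List.pyGetD nxt i 0 = nxt.getD i.toNat 0 :=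
        PySem.List.pyGetD_of_nonneg _ _ hi'
      obtain ⟨hj0, hji, hjocc⟩ := hI i.toNat hik
      set j : Int := nxt.getD i.toNat 0 with hjdef
      have hslotj : PySem.List.pyGetD slot j 1 = slot.getD j.toNat 1 :=
        PySem.List.pyGetD_of_nonneg _ _ hj0
      unfold pvWalkB
      rw [if_neg (by omega), hnxt, hslotj]
      by_cases hz : slot.getD j.toNat 1 = 0
      · rw [if_neg (not_not_intro hz)]
        have hF : pvF slot i = j := by
          have hT : pvTop slot (i.toNat + 1) = some j.toNat := by
            apply pvTop_intro slot _ _ (by omega) hz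
            intro m h1 h2
            exact hjocc m (by omega) (by omega)
          rw [pvF_of_top slot i j.toNat hi hT]
          omega
        refine ⟨[], ?_, ?_⟩
        · rw [hF]; simp
        · intro k hk; simp at hk
      · rw [if_pos hz]
        have hcg : pvTop slot (i.toNat + 1) = pvTop slot j.toNat := by
          apply pvTop_congr slot j.toNat (i.toNat + 1) (by omega)
          intro m hm1 hm2
          by_cases hmj : m = j.toNat
          · subst hmj; exact hz
          · exact hjocc m (by omega) (by omega)
        have hFeq : pvF slot i = pvF slot (j - 1) := by
          by_cases hjz : j - 1 < 0
          · have h0 : j.toNat = 0 := by omega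
            have hT : pvTop slot (i.toNat + 1) = none := by
              rw [hcg, h0]; rfl
            rw [pvF_of_none slot i hi hT, pvF_of_neg slot (j - 1) hjz]
          · have heq : (j - 1).toNat + 1 = j.toNat := by omega
            cases hT2 : pvTop slot j.toNat with
            | none =>
              rw [pvF_of_none slot i hi (by rw [hcg]; exact hT2),
                pvF_of_none slot (j - 1) hjz (by rw [heq]; exact hT2)]
            | some k =>
              rw [pvF_of_top slot i k hi (by rw [hcg]; exact hT2),
                pvF_of_top slot (j - 1) k hjz (by rw [heq]; exact hT2)]
        obtain ⟨p', hp'eq, hp'fact⟩ := ihf (j - 1) (path ++ [i]) (by omega)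
          (by split_ifs with hjz <;> omega)
        refine ⟨i :: p', ?_, ?_⟩
        · rw [hp'eq, hFeq, List.append_assoc]
          rfl
        · intro k hk
          rcases List.mem_cons.mp hk with hki | hk'
          · rw [hki]
            refine ⟨hi', hilen, ?_, fun m h1 h2 => pvF_max slot i m h1 h2⟩
            rcases pvF_le slot (j - 1) with h | h <;> rw [hFeq] <;> omega
          · obtain ⟨f1, f2, f3, f4⟩ := hp'fact k hk'
            rw [hFeq]
            exact ⟨f1, f2, f3, f4⟩

-- the compression loop preserves the invariant (the slot array is unchanged by it)
lemma pvInvB_update (slot : List Int) (F : Int) (p : List Int)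
    (hp : ∀ k ∈ p, 0 ≤ k ∧ k < (slot.length : Int) ∧ F < k ∧
      ∀ m : Nat, F < (m : Int) → (m : Int) ≤ k → ¬ slot.getD m 1 = 0) :
    ∀ nxt, pvInvB slot nxt →
    pvInvB slot (p.foldl (fun nx k => PySem.List.pySetD nx k (if 0 ≤ F then F else 0)) nxt) := by
  induction p with
  | nil => intro nxt h; exact h
  | cons k p' ih =>
    intro nxt hInv
    obtain ⟨hk0, hklen, hkF, hkocc⟩ := hp k List.mem_cons_self
    obtain ⟨hlen, hI⟩ := hInv
    simp only [List.foldl_cons]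
    apply ih (fun k' hk' => hp k' (List.mem_cons_of_mem _ hk'))
    rw [PySem.List.pySetD_of_nonneg _ _ hk0]
    constructor
    · rw [List.length_set]; exact hlen
    · intro k' hk'
      by_cases hkk : k' = k.toNat
      · subst hkk
        rw [pv_getD_set_self _ _ _ (by omega)]
        refine ⟨by split_ifs <;> omega, by split_ifs <;> omega, ?_⟩
        intro m h1 h2
        apply hkocc m ?_ (by omega)
        split_ifs at h1 <;> omega
      · rw [pv_getD_set_ne _ _ _ _ _ hkk]
        exact hI k' hk'

-- filling a free slot preserves the invariant (no asserted-occupied cell is the free one)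
lemma pvInvB_fill (slot nxt : List Int) (hInv : pvInvB slot nxt) (F jid : Int) (_hF : 0 ≤ F)
    (_hFlen : F < (slot.length : Int)) (hfree : slot.getD F.toNat 1 = 0) :
    pvInvB (slot.set F.toNat jid) nxt := by
  obtain ⟨hlen, hI⟩ := hInv
  constructor
  · rw [List.length_set]; exact hlen
  · intro k hk
    rw [List.length_set] at hk
    obtain ⟨h1, h2, h3⟩ := hI k hk
    refine ⟨h1, h2, ?_⟩
    intro m hm1 hm2
    have hmF : m ≠ F.toNat := by
      intro hh
      exact h3 m hm1 hm2 (hh ▸ hfree)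
    rw [pv_getD_set_ne _ _ _ _ _ hmF]
    exact h3 m hm1 hm2

-- _latest_free returns pvF and an invariant-respecting pointer array
lemma pvLatestFree_spec (slot nxt : List Int) (hInv : pvInvB slot nxt) (i : Int)
    (hi : i < (slot.length : Int)) :
    (pvLatestFree slot nxt i).1 = pvF slot i ∧ pvInvB slot (pvLatestFree slot nxt i).2 := by
  obtain ⟨p, hpeq, hpfact⟩ := pvWalk_spec slot nxt hInv (slot.length + 2) i []
    hi (by split_ifs <;> omega)
  unfold pvLatestFree
  rw [hpeq]
  simp only [List.nil_append]
  exact ⟨trivial, pvInvB_update slot (pvF slot i) p hpfact nxt hInv⟩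

-- the two scheduling loops run in lock-step: same slot array, same loss
lemma pv_simB (js : List (Int × Int × Int)) :
    ∀ (slot nxt : List Int) (loss : Int), pvInvB slot nxt →
    (∀ j ∈ js, j.2.1 ≤ (slot.length : Int) ∨ j.2.1 ≤ 0) →
    pvOuterA js slot loss = ((pvOuterB js slot nxt loss).1, (pvOuterB js slot nxt loss).2.2) := by
  induction js with
  | nil => intro slot nxt loss _ _; rfl
  | cons j rest ih =>
    obtain ⟨jid, d, l⟩ := j
    intro slot nxt loss hInv hjs
    have hd : d ≤ (slot.length : Int) ∨ d ≤ 0 := hjs _ List.mem_cons_self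
    have hrest : ∀ j ∈ rest, j.2.1 ≤ (slot.length : Int) ∨ j.2.1 ≤ 0 :=
      fun j hj => hjs j (List.mem_cons_of_mem _ hj)
    have hdi : d - 1 < (slot.length : Int) := by omega
    obtain ⟨hLF1, hLF2⟩ := pvLatestFree_spec slot nxt hInv (d - 1) hdi
    simp only [pvOuterA, pvOuterB]
    by_cases hd0 : d ≤ 0
    · rw [PySem.List.pyRange_neg_one_eq_nil (by omega)]
      simp only [pvInnerA]
      have hFneg : pvF slot (d - 1) = -1 := pvF_of_neg slot (d - 1) (by omega)
      rw [if_neg (by rw [hLF1, hFneg]; omega)]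
      exact ih slot _ loss hLF2 hrest
    · set dn : Nat := d.toNat with hdn
      have hdc : d - 1 = (dn : Int) - 1 := by omega
      have hInner := pvInnerA_eq jid l loss slot dn
      rw [← hdc] at hInner
      rw [hInner]
      have hcnv : (d - 1).toNat + 1 = dn := by omega
      cases hT : pvTop slot dn with
      | none =>
        have hF : pvF slot (d - 1) = -1 :=
          pvF_of_none slot (d - 1) (by omega) (by rw [hcnv]; exact hT)
        rw [if_neg (by rw [hLF1, hF]; omega)]
        exact ih slot _ loss hLF2 hrest
      | some k =>
        have hF : pvF slot (d - 1) = (k : Int) :=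
          pvF_of_top slot (d - 1) k (by omega) (by rw [hcnv]; exact hT)
        obtain ⟨hkdn, hkz, hklen⟩ := pvTop_some slot dn k hT
        rw [if_pos (by rw [hLF1, hF]; omega)]
        have hset : PySem.List.pySetD slot (pvLatestFree slot nxt (d - 1)).1 jid
            = slot.set k jid := by
          rw [hLF1, hF, PySem.List.pySetD_natCast]
        rw [hset]
        apply ih
        · have hfill := pvInvB_fill slot _ hLF2 (k : Int) jid (by omega)
            (by exact_mod_cast hklen) (by simpa using hkz)
          simpa using hfill
        · intro j hj
          rw [List.length_set]
          exact hrest j hj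

-- ===== VERDICT (by name: the statement is the Claim_ definition above) =====
theorem greedy_min_penalty_spec : Claim_equal_greedy_min_penalty := by
  intro jobs slots _ hpre
  unfold Spec_greedy_min_penalty greedy_min_penalty greedy_min_penalty_alt
  simp only
  set js := PySem.List.sorted jobs (fun x => -x.2.2) false with hjsdef
  have hpen : js.foldl (fun p j => p + j.2.2) 0 = (js.map (fun j => j.2.2)).sum := by
    rw [PySem.List.foldl_add]; simp
  set L : Nat := slots.toNat with hL
  have hslot0 : (PySem.List.pyRange 0 slots 1).foldl (fun s _ => s ++ [(0 : Int)]) [] =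
      List.replicate L (0 : Int) := by
    rw [PySem.List.foldl_append_singleton_eq_map]
    simp only [List.nil_append]
    rw [List.map_const', PySem.List.length_pyRange_one]
    congr 1
    omega
  have hlenrep : (List.replicate L (0 : Int)).length = L := List.length_replicate
  set nxt0 : List Int := PySem.List.pyRange 0 ((List.replicate L (0 : Int)).length : Int) 1
    with hnxt0
  have hInv0 : pvInvB (List.replicate L (0 : Int)) nxt0 := by
    constructor
    · rw [hnxt0, PySem.List.length_pyRange_one, hlenrep]; omega
    · intro k hk
      rw [hlenrep] at hk
      have hlen0 : nxt0.length = L := by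
        rw [hnxt0, PySem.List.length_pyRange_one, hlenrep]; omega
      have hget : nxt0.getD k 0 = (k : Int) := by
        rw [hnxt0]
        rw [List.getD_eq_getElem _ _ (by rw [PySem.List.length_pyRange_one]; omega)]
        rw [PySem.List.getElem_pyRange_one]
        omega
      rw [hget]
      exact ⟨by omega, le_refl _, fun m h1 h2 => by omega⟩
  have hjs : ∀ j ∈ js, j.2.1 ≤ ((List.replicate L (0 : Int)).length : Int) ∨ j.2.1 ≤ 0 := by
    intro j hj
    have hjm : j ∈ jobs := (PySem.List.mem_sorted jobs _ false j).mp hj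
    rw [hlenrep]
    rcases hpre j hjm with h | h
    · by_cases hs : 0 < slots
      · left; omega
      · right; omega
    · right; exact h
  have hsim := pv_simB js (List.replicate L (0 : Int)) nxt0 0 hInv0 hjs
  rw [hslot0, hpen, hsim]
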